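-- pv_equiv track=rewrite | github.com/ilkutkutlar/minesweeper_model | minesweeper_model/str_input_to_mine_coords.py | str_input_to_mine_coords
-- ===== SOURCE A (Python) =====
-- def str_input_to_mine_coords(input_string):
-- 	mine_coord=[]
-- 	x_len,y_len=0,0
--
-- 	temp=input_string.split("\n")
-- 	x_len,y_len=len(temp[0]),len(temp)
--
-- 	x_mine,y_mine=0,0
--
-- 	for i in temp:
-- 		x_mine=0
-- 		for s in i:
-- 			if(s=='x'):
-- 				mine_coord.append((x_mine,y_mine))
-- 			x_mine+=1
-- 		y_mine+=1
--
-- 	return (x_len, y_len, mine_coord)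
-- ===== SOURCE B (Python) =====
-- def str_input_to_mine_coords(input_string):
--     lines = input_string.split("\n")
--     mine_coord = []
--     for y, line in enumerate(lines):
--         idx = line.find('x')
--         while idx != -1:
--             mine_coord.append((idx, y))
--             idx = line.find('x', idx + 1)
--     return (len(lines[0]), len(lines), mine_coord)
-- ===== Notes on version B (the rewrite author's own statement) =====
-- stated objective: faster
-- what changed: The inner char-by-char scan with a manual column counter is replaced by a loop over successive str.find hits per enumerate-indexed line, so Python-level work per line is proportional to the number of mines, the scanning being done by str.find in C.
import Mathlib
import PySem

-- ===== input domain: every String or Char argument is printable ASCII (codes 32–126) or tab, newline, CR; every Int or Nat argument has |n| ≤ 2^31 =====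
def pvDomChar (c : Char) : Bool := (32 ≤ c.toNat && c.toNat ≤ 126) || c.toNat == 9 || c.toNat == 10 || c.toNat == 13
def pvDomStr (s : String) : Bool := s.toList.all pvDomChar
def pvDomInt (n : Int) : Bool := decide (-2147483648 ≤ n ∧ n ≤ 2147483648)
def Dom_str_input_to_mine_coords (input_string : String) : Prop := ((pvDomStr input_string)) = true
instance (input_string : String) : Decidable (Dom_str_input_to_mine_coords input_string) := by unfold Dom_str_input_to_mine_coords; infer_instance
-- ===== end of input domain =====

-- B replaces A's char-by-char inner scan (manual x_mine counter) with a loop over the hits of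
-- str.find('x', start) per enumerate-indexed line; same return value, alternative structure.

-- ===== PORT A =====
def str_input_to_mine_coords (input_string : String) : Int × Int × (List (Int × Int)) :=
  -- temp = input_string.split("\n"); the separator is non-empty, so split? is never none
  let temp := (PySem.Str.split? input_string "\n").getD []
  -- x_len = len(temp[0]); Python's split never returns an empty list, so temp[0] always exists
  let x_len : Int := PySem.Str.len (temp.headD "")
  let y_len : Int := temp.length
  -- for i in temp: x_mine = 0; for s in i: if s=='x': append (x_mine, y_mine); x_mine += 1; y_mine += 1
  let fin :=
    temp.foldl (fun (st : Int × List (Int × Int)) (i : String) =>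
      let inner :=
        i.toList.foldl (fun (st2 : Int × List (Int × Int)) (s : Char) =>
          (st2.1 + 1, if s = 'x' then st2.2 ++ [(st2.1, st.1)] else st2.2))
          (0, st.2)
      (st.1 + 1, inner.2)) (0, [])
  (x_len, y_len, fin.2)

-- ===== PORT B =====
-- the while loop of Source B: idx = line.find('x', start); while idx != -1: append (idx, y); advance.
-- `fuel` only makes the same computation total (each hit strictly advances `start`, so
-- line.length + 1 steps always suffice); it changes no value.
def pvFindLoop (line : List Char) (y : Int) (fuel : Nat) (start : Int) : List (Int × Int) :=
  match fuel with
  | 0 => []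
  | fuel + 1 =>
    let idx := PySem.Chars.findFrom line ['x'] start
    if idx = -1 then []
    else (idx, y) :: pvFindLoop line y fuel (idx + 1)

def str_input_to_mine_coords_alt (input_string : String) : Int × Int × (List (Int × Int)) :=
  -- lines = input_string.split("\n")
  let lines := (PySem.Str.split? input_string "\n").getD []
  -- for y, line in enumerate(lines): the find-loop appends this line's mine coordinates
  let mine_coord := (PySem.List.enumerate lines).foldl
      (fun acc (p : Int × String) => acc ++ pvFindLoop p.2.toList p.1 (p.2.toList.length + 1) 0) []
  (PySem.Str.len (lines.headD ""), (lines.length : Int), mine_coord)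

-- ===== PRECONDITION & SPEC =====
def Spec_str_input_to_mine_coords (input_string : String) (out : Int × Int × (List (Int × Int))) : Prop := out = str_input_to_mine_coords_alt input_string
instance (input_string : String) (out : Int × Int × (List (Int × Int))) : Decidable (Spec_str_input_to_mine_coords input_string out) := by unfold Spec_str_input_to_mine_coords; infer_instance

-- ===== CLAIM (what is proved, stated in full; the proofs are below) =====
def Claim_equal_str_input_to_mine_coords : Prop := ∀ (input_string : String), Dom_str_input_to_mine_coords input_string → Spec_str_input_to_mine_coords input_string (str_input_to_mine_coords input_string)

-- ===== LEMMAS AND PROOFS =====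

-- the coordinates of the 'x' characters of l, with column offset k, fixed row y
def pvOcc (l : List Char) (k : Nat) (y : Int) : List (Int × Int) :=
  match l with
  | [] => []
  | c :: t => (if c = 'x' then [((k : Int), y)] else []) ++ pvOcc t (k + 1) y

-- all mine coordinates of `lines`, row index starting at y
def pvRows (lines : List String) (y : Nat) : List (Int × Int) :=
  match lines with
  | [] => []
  | l :: t => pvOcc l.toList 0 (y : Int) ++ pvRows t (y + 1)

theorem pvOcc_no_x (l : List Char) (k : Nat) (y : Int) (h : 'x' ∉ l) :
    pvOcc l k y = [] := by
  induction l generalizing k with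
  | nil => rfl
  | cons c t ih =>
    simp only [List.mem_cons, not_or] at h
    simp [pvOcc, Ne.symm h.1, ih _ h.2]

theorem pvOcc_split (l : List Char) (y : Int) (m : Nat) :
    ∀ (k n : Nat), n - k = m → k ≤ n → n < l.length →
      (∀ i, k ≤ i → i < n → l[i]? ≠ some 'x') → l[n]? = some 'x' →
      pvOcc (l.drop k) k y = ((n : Int), y) :: pvOcc (l.drop (n + 1)) (n + 1) y := by
  induction m with
  | zero =>
    intro k n hm hkn hn _ hx
    have hk : k = n := by omega
    subst hk
    rw [← List.getElem_cons_drop (show k < l.length by omega)]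
    have : l[k] = 'x' := by
      have := List.getElem?_eq_getElem (l := l) (i := k) (by omega)
      rw [this] at hx; exact Option.some.inj hx
    simp [pvOcc, this]
  | succ m ih =>
    intro k n hm hkn hn hno hx
    have hklt : k < n := by omega
    rw [← List.getElem_cons_drop (show k < l.length by omega)]
    have hne : l[k] ≠ 'x' := by
      intro he
      exact hno k le_rfl hklt (by rw [List.getElem?_eq_getElem (by omega), he])
    rw [pvOcc]
    simp only [if_neg hne, List.nil_append]
    exact ih (k + 1) n (by omega) (by omega) hn (fun i h1 h2 => hno i (by omega) h2) hx

theorem pvPrefix_getElem (l : List Char) (n : Nat) (h : ['x'] <+: l.drop n) :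
    l[n]? = some 'x' := by
  obtain ⟨t, ht⟩ := h
  have : (l.drop n)[0]? = some 'x' := by rw [← ht]; rfl
  rwa [List.getElem?_drop, Nat.add_zero] at this

theorem pvFindLoop_eq (l : List Char) (y : Int) (m : Nat) :
    ∀ (k : Nat), k ≤ l.length → l.length - k < m →
      pvFindLoop l y m (k : Int) = pvOcc (l.drop k) k y := by
  induction m with
  | zero => intro k _ hm; omega
  | succ m ih =>
    intro k hk hm
    rw [pvFindLoop]
    by_cases hneg : PySem.Chars.findFrom l ['x'] (k : Int) = -1
    · rw [if_pos hneg]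
      have hno : ¬ ['x'] <:+: l.drop k :=
        (PySem.Chars.findFrom_natCast_eq_neg_one_iff l ['x'] k hk).mp hneg
      rw [pvOcc_no_x _ _ _ (fun hmem => hno ((List.singleton_infix_iff _ _).mpr hmem))]
    · rw [if_neg hneg]
      obtain ⟨h1, h2, h3⟩ := PySem.Chars.findFrom_natCast_spec l ['x'] k hk hneg
      set idx := PySem.Chars.findFrom l ['x'] (k : Int) with hidx
      have h0 : 0 ≤ idx := le_trans (by positivity) h1
      have hlt : idx.toNat < l.length := by
        have := h2.length_le
        simp only [List.length_cons, List.length_nil, List.length_drop] at this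
        omega
      have hxg : l[idx.toNat]? = some 'x' := pvPrefix_getElem l idx.toNat h2
      have hnog : ∀ i, k ≤ i → i < idx.toNat → l[i]? ≠ some 'x' := by
        intro i hi1 hi2 hie
        refine h3 i hi1 hi2 ⟨l.drop (i + 1), ?_⟩
        rw [← List.getElem_cons_drop (show i < l.length by omega)]
        have : l[i] = 'x' := by
          rw [List.getElem?_eq_getElem (by omega)] at hie
          exact Option.some.inj hie
        rw [this]
        rfl
      have hge : k ≤ idx.toNat := by omega
      rw [pvOcc_split l y (idx.toNat - k) k idx.toNat rfl (by omega) hlt hnog hxg]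
      have hcast2 : idx + 1 = (((idx.toNat + 1 : Nat)) : Int) := by omega
      rw [hcast2, ih (idx.toNat + 1) (by omega) (by omega)]
      congr 1
      exact Prod.ext (by omega) rfl

theorem pvInner_eq (y : Int) (l : List Char) :
    ∀ (k : Nat) (acc : List (Int × Int)),
      l.foldl (fun (st2 : Int × List (Int × Int)) (s : Char) =>
          (st2.1 + 1, if s = 'x' then st2.2 ++ [(st2.1, y)] else st2.2)) ((k : Int), acc)
        = (((k : Int) + l.length), acc ++ pvOcc l k y) := by
  induction l with
  | nil => simp [pvOcc]
  | cons c t ih =>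
    intro k acc
    rw [List.foldl_cons]
    have hcast : ((k : Int)) + 1 = ((k + 1 : Nat) : Int) := by push_cast; ring
    by_cases hc : c = 'x'
    · simp only [hc, if_pos]
      rw [hcast, ih (k + 1) (acc ++ [((k : Int), y)])]
      simp [pvOcc]
      ring
    · simp only [if_neg hc]
      rw [hcast, ih (k + 1) acc]
      simp [pvOcc, hc]
      ring

theorem pvOuterA_eq (lines : List String) :
    ∀ (y : Nat) (acc : List (Int × Int)),
      lines.foldl (fun (st : Int × List (Int × Int)) (i : String) =>
        let inner :=
          i.toList.foldl (fun (st2 : Int × List (Int × Int)) (s : Char) =>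
            (st2.1 + 1, if s = 'x' then st2.2 ++ [(st2.1, st.1)] else st2.2))
            (0, st.2)
        (st.1 + 1, inner.2)) ((y : Int), acc)
        = (((y : Int) + lines.length), acc ++ pvRows lines y) := by
  induction lines with
  | nil => simp [pvRows]
  | cons l t ih =>
    intro y acc
    rw [List.foldl_cons]
    simp only []
    rw [show ((0 : Int), acc) = (((0 : Nat) : Int), acc) by norm_num,
        pvInner_eq (y : Int) l.toList 0 acc]
    rw [show ((y : Int) + 1) = (((y + 1 : Nat) : Int)) by push_cast; ring, ih (y + 1)]
    simp [pvRows]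
    ring

theorem pvOuterB_eq (lines : List String) :
    ∀ (y : Nat) (acc : List (Int × Int)),
      (PySem.List.enumerate lines (y : Int)).foldl
        (fun acc (p : Int × String) => acc ++ pvFindLoop p.2.toList p.1 (p.2.toList.length + 1) 0) acc
        = acc ++ pvRows lines y := by
  induction lines with
  | nil => simp [pvRows, PySem.List.enumerate_nil]
  | cons l t ih =>
    intro y acc
    rw [PySem.List.enumerate_cons, List.foldl_cons]
    rw [show ((y : Int) + 1) = (((y + 1 : Nat) : Int)) by push_cast; ring, ih (y + 1)]
    have := pvFindLoop_eq l.toList (y : Int) (l.toList.length + 1) 0 (by simp) (by omega)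
    simp only [Nat.cast_zero] at this
    rw [this]
    simp [pvRows]

-- ===== VERDICT (by name: the statement is the Claim_ definition above) =====
theorem str_input_to_mine_coords_spec : Claim_equal_str_input_to_mine_coords := by
  intro s _
  unfold Spec_str_input_to_mine_coords str_input_to_mine_coords str_input_to_mine_coords_alt
  simp only []
  have hA := pvOuterA_eq ((PySem.Str.split? s "\n").getD []) 0 []
  have hB := pvOuterB_eq ((PySem.Str.split? s "\n").getD []) 0 []
  simp only [Nat.cast_zero] at hA hB
  rw [hA, hB]
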